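-- pv_equiv track=rewrite | github.com/pypi-data/pypi-mirror-95 | packages/tala/tala-10.0.0-py3-none-any.whl/tala/nl/gf/utils.py | lower_gf_string_but_insert_capit_and_bind
-- ===== SOURCE A (Python) =====
-- def lower_gf_string_but_insert_capit_and_bind(string):
--     lowered_string = '"'
--     previous_char = None
--     for char in string:
--         if not char.isupper():
--             lowered_string += char
--         else:
--             is_char_in_mid_of_word = previous_char and not previous_char.isspace()
--             if is_char_in_mid_of_word:
--                 lowered_string += '" ++ CAPIT ++ BIND ++ "%s' % char.lower()
--             else:
--                 lowered_string += '" ++ CAPIT ++ "%s' % char.lower()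
--
--         previous_char = char
--     lowered_string += '"'
--     if "CAPIT" in lowered_string:
--         return "(%s)" % lowered_string
--     return lowered_string
-- ===== SOURCE B (Python) =====
-- def lower_gf_string_but_insert_capit_and_bind(string):
--     ups = [i for i, c in enumerate(string) if c.isupper()]
--     out = '"'
--     prev = 0
--     for i in ups:
--         out += string[prev:i]
--         if i > 0 and not string[i - 1].isspace():
--             out += '" ++ CAPIT ++ BIND ++ "'
--         else:
--             out += '" ++ CAPIT ++ "'
--         out += string[i].lower()
--         prev = i + 1
--     out += string[prev:] + '"'
--     if ups:
--         return "(%s)" % out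
--     return out
-- ===== Notes on version B (the rewrite author's own statement) =====
-- stated objective: alternative
-- what changed: Replaces A's single stateful character-by-character loop (accumulating the output and the previous character) by a two-pass index-then-assemble decomposition: first collect the uppercase positions, then assemble the output by copying verbatim slices between consecutive uppercase indices, deciding the wrap from the collected index list instead of a substring search.
import Mathlib
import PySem

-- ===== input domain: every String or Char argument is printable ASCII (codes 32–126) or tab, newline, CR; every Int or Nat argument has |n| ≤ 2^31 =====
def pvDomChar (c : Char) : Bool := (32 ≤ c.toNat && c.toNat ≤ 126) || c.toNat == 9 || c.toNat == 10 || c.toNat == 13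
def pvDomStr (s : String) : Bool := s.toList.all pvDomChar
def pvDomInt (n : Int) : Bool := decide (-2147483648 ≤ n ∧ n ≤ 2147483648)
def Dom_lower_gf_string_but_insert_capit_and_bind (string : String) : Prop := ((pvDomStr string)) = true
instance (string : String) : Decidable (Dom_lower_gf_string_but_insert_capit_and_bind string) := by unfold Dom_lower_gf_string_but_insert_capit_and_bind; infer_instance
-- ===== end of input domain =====

-- B re-implements A by a two-pass index-then-assemble decomposition (collect the uppercase
-- positions first, then copy the verbatim slices between them); same cost, a different structure.

-- the two GF marker string literals both Pythons write
def pvMarkBind : List Char := "\" ++ CAPIT ++ BIND ++ \"".toList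
def pvMarkCap : List Char := "\" ++ CAPIT ++ \"".toList

-- ===== PORT A =====
-- literal port of A: one stateful pass, accumulating the quoted body and the previous character
def pvStepA (st : List Char × Option Char) (c : Char) : List Char × Option Char :=
  if ¬ PySem.Chars.isupper c then (st.1 ++ [c], some c)
  else
    let midWord : Bool := match st.2 with
      | some p => !PySem.Chars.isspace p
      | none => false
    if midWord then (st.1 ++ pvMarkBind ++ [PySem.Chars.lowerChar c], some c)
    else (st.1 ++ pvMarkCap ++ [PySem.Chars.lowerChar c], some c)

def lower_gf_string_but_insert_capit_and_bind (string : String) : String :=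
  let st := string.toList.foldl pvStepA (['"'], none)
  let body := st.1 ++ ['"']
  if PySem.Chars.isIn "CAPIT".toList body then String.ofList ('(' :: (body ++ [')'])) else String.ofList body

-- ===== PORT B =====
-- literal port of Source B: first pass collects uppercase indices, second pass assembles via slices
def pvStepB (l : List Char) (st : List Char × Int) (i : Int) : List Char × Int :=
  let out := st.1 ++ PySem.List.slice l (some st.2) (some i)
  let out := if 0 < i ∧ ¬ PySem.Chars.isspace (PySem.List.pyGetD l (i - 1) ' ')
             then out ++ pvMarkBind
             else out ++ pvMarkCap
  (out ++ [PySem.Chars.lowerChar (PySem.List.pyGetD l i ' ')], i + 1)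

def lower_gf_string_but_insert_capit_and_bind_alt (string : String) : String :=
  let l := string.toList
  let ups : List Int := (PySem.List.enumerate l).filterMap
    (fun p => if PySem.Chars.isupper p.2 then some p.1 else none)
  let st := ups.foldl (pvStepB l) (['"'], 0)
  let body := st.1 ++ PySem.List.slice l (some st.2) none ++ ['"']
  if ups ≠ [] then String.ofList ('(' :: (body ++ [')'])) else String.ofList body

-- ===== PRECONDITION & SPEC =====
def Spec_lower_gf_string_but_insert_capit_and_bind (string : String) (out : String) : Prop := out = lower_gf_string_but_insert_capit_and_bind_alt string
instance (string : String) (out : String) : Decidable (Spec_lower_gf_string_but_insert_capit_and_bind string out) := by unfold Spec_lower_gf_string_but_insert_capit_and_bind; infer_instance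

-- ===== CLAIM (what is proved, stated in full; the proofs are below) =====
def Claim_equal_lower_gf_string_but_insert_capit_and_bind : Prop := ∀ (string : String), Dom_lower_gf_string_but_insert_capit_and_bind string → Spec_lower_gf_string_but_insert_capit_and_bind string (lower_gf_string_but_insert_capit_and_bind string)

-- ===== LEMMAS AND PROOFS =====

set_option maxRecDepth 4096

-- what A appends for an uppercase character, as a function of the previous character
def pvMark (prev : Option Char) : List Char :=
  if (match prev with | some p => !PySem.Chars.isspace p | none => false) then pvMarkBind else pvMarkCap

-- the body A builds after the opening quote, recursively
def pvGA (prev : Option Char) : List Char → List Char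
  | [] => []
  | c :: cs =>
    (if PySem.Chars.isupper c then pvMark prev ++ [PySem.Chars.lowerChar c] else [c]) ++ pvGA (some c) cs

theorem pvDropSucc (l : List Char) (k : Nat) (c : Char) (rest : List Char)
    (hd : l.drop k = c :: rest) : l.drop (k + 1) = rest := by
  rw [← List.tail_drop, hd]
  rfl

theorem pvGA_foldA (cs : List Char) : ∀ (acc : List Char) (prev : Option Char),
    (cs.foldl pvStepA (acc, prev)).1 = acc ++ pvGA prev cs := by
  induction cs with
  | nil => simp [pvGA]
  | cons c cs ih =>
    intro acc prev
    rw [List.foldl_cons]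
    by_cases h : PySem.Chars.isupper c
    · have hm : pvStepA (acc, prev) c = (acc ++ pvMark prev ++ [PySem.Chars.lowerChar c], some c) := by
        cases prev with
        | none => simp [pvStepA, pvMark, h]
        | some p =>
          by_cases hs : PySem.Chars.isspace p
          · simp [pvStepA, pvMark, h, hs]
          · simp [pvStepA, pvMark, h, hs]
      rw [hm, ih]
      simp [pvGA, h]
    · have hm : pvStepA (acc, prev) c = (acc ++ [c], some c) := by simp [pvStepA, h]
      rw [hm, ih]
      simp [pvGA, h]

def pvUps (s : List Char) (k : Int) : List Int :=
  (PySem.List.enumerate s k).filterMap (fun p => if PySem.Chars.isupper p.2 then some p.1 else none)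

theorem pvUps_nil (k : Int) : pvUps [] k = [] := by simp [pvUps, PySem.List.enumerate_nil]

theorem pvUps_cons (c : Char) (s : List Char) (k : Int) :
    pvUps (c :: s) k = (if PySem.Chars.isupper c then [k] else []) ++ pvUps s (k + 1) := by
  simp only [pvUps, PySem.List.enumerate_cons, List.filterMap_cons]
  split <;> simp_all

theorem pvUps_lb (s : List Char) : ∀ (k : Int), ∀ i ∈ pvUps s k, k ≤ i := by
  induction s with
  | nil => intro k i hi; simp [pvUps_nil] at hi
  | cons c s ih =>
    intro k i hi
    rw [pvUps_cons] at hi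
    rcases List.mem_append.1 hi with h | h
    · split at h <;> simp at h; omega
    · have := ih (k + 1) i h; omega

-- B's assembled tail: run the fold on a list of indices, then append the final slice
def pvGB (l : List Char) (st : List Char × Int) (ups0 : List Int) : List Char :=
  let st' := ups0.foldl (pvStepB l) st
  st'.1 ++ PySem.List.slice l (some st'.2) none

def pvPrevO (l : List Char) (k : Nat) : Option Char :=
  if k = 0 then none else some (l.getD (k - 1) ' ')

theorem pvShift (l : List Char) (k : Nat) (c : Char) (rest : List Char)
    (hd : l.drop k = c :: rest) (acc : List Char) :
    ∀ (ups0 : List Int), (∀ i ∈ ups0, (k : Int) < i) →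
    pvGB l (acc, (k : Int)) ups0 = pvGB l (acc ++ [c], (k : Int) + 1) ups0 := by
  intro ups0 hub
  have hdrop1 : l.drop (k + 1) = rest := pvDropSucc l k c rest hd
  cases ups0 with
  | nil =>
    have hcast : ((k : Int) + 1) = ((k + 1 : Nat) : Int) := by push_cast; ring
    simp only [pvGB, List.foldl_nil, hcast, PySem.List.slice_from_natCast, hd, hdrop1]
    simp
  | cons i is =>
    have hki : (k : Int) < i := hub i (List.mem_cons_self)
    have h0 : (0:Int) ≤ (k:Int) := by omega
    have hslice : PySem.List.slice l (some (k : Int)) (some i) =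
        c :: PySem.List.slice l (some ((k : Int) + 1)) (some i) := by
      rw [PySem.List.slice_toNat _ h0 (by omega), PySem.List.slice_toNat _ (by omega) (by omega)]
      simp only [Int.toNat_natCast, hd]
      have h2 : ((k:Int) + 1).toNat = k + 1 := by omega
      rw [h2, hdrop1]
      have h3 : i.toNat - k = (i.toNat - (k + 1)) + 1 := by omega
      rw [h3, List.take_succ_cons]
    simp only [pvGB, List.foldl_cons]
    have hstep : pvStepB l (acc, (k : Int)) i = pvStepB l (acc ++ [c], (k : Int) + 1) i := by
      simp [pvStepB, hslice]
    rw [hstep]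

theorem pvMain (l : List Char) (s : List Char) : ∀ (k : Nat) (acc : List Char),
    l.drop k = s → pvGB l (acc, (k : Int)) (pvUps s k) = acc ++ pvGA (pvPrevO l k) s := by
  induction s with
  | nil =>
    intro k acc hd
    simp [pvGB, pvUps_nil, pvGA, PySem.List.slice_from_natCast, hd]
  | cons c s ih =>
    intro k acc hd
    have hdrop1 : l.drop (k + 1) = s := pvDropSucc l k c s hd
    have hsome : l[k]? = some c := by
      rw [← List.head?_drop, hd]; rfl
    have hget : l.getD k ' ' = c := by
      rw [List.getD_eq_getElem?_getD, hsome]; rfl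
    have hcast : ((k : Int) + 1) = ((k + 1 : Nat) : Int) := by push_cast; ring
    have hprev : pvPrevO l (k + 1) = some c := by
      simp [pvPrevO, hsome]
    by_cases hu : PySem.Chars.isupper c
    · rw [pvUps_cons]
      simp only [hu, if_true, List.singleton_append]
      have h0 : (0:Int) ≤ (k:Int) := by omega
      have hsl : PySem.List.slice l (some (k:Int)) (some (k:Int)) = [] := by
        rw [PySem.List.slice_toNat _ h0 h0]; simp
      have hgetI : PySem.List.pyGetD l (k : Int) ' ' = c := by
        rw [PySem.List.pyGetD_natCast]; exact hget
      have hstep : pvStepB l (acc, (k : Int)) (k : Int) =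
          (acc ++ pvMark (pvPrevO l k) ++ [PySem.Chars.lowerChar c], (k : Int) + 1) := by
        simp only [pvStepB, hsl, List.append_nil, hgetI]
        rcases Nat.eq_zero_or_pos k with hk0 | hkpos
        · subst hk0
          norm_num [pvMark, pvPrevO]
        · have hne : k ≠ 0 := by omega
          have h1 : ((k : Int) - 1) = ((k - 1 : Nat) : Int) := by push_cast [hkpos]; ring
          have hg1 : PySem.List.pyGetD l ((k:Int) - 1) ' ' = l.getD (k - 1) ' ' := by
            rw [h1, PySem.List.pyGetD_natCast]
          simp only [pvMark, pvPrevO, if_neg hne, hg1]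
          cases hsp : PySem.Chars.isspace (l.getD (k - 1) ' ') with
          | false =>
            rw [if_pos ⟨by exact_mod_cast hkpos, by decide⟩, if_pos (by decide)]
          | true =>
            rw [if_neg (fun hc => hc.2 rfl), if_neg (by decide)]
      have hGBstep : pvGB l (acc, (k:Int)) ((k:Int) :: pvUps s ((k:Int) + 1)) =
          pvGB l (acc ++ pvMark (pvPrevO l k) ++ [PySem.Chars.lowerChar c], (k : Int) + 1)
            (pvUps s ((k:Int) + 1)) := by
        simp [pvGB, hstep]
      rw [hGBstep, hcast, ih (k + 1) _ hdrop1, hprev]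
      simp [pvGA, hu]
    · rw [pvUps_cons]
      simp [hu]
      rw [pvShift l k c s hd acc _ (fun i hi => by have := pvUps_lb s ((k:Int) + 1) i hi; omega)]
      rw [hcast, ih (k + 1) _ hdrop1, hprev]
      simp [pvGA, hu]

-- the wrap condition: A's "CAPIT" test holds iff B found an uppercase position
theorem pvGA_no_upper (s : List Char) : ∀ prev, (∀ c ∈ s, ¬ PySem.Chars.isupper c) →
    pvGA prev s = s := by
  induction s with
  | nil => intro prev _; rfl
  | cons c s ih =>
    intro prev h
    have hc := h c (List.mem_cons_self)
    simp [pvGA, hc, ih (some c) (fun x hx => h x (List.mem_cons_of_mem _ hx))]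

theorem pvUps_eq_nil_iff (s : List Char) : ∀ k, pvUps s k = [] ↔ ∀ c ∈ s, ¬ PySem.Chars.isupper c := by
  induction s with
  | nil => intro k; simp [pvUps_nil]
  | cons c s ih =>
    intro k
    rw [pvUps_cons]
    constructor
    · intro h
      rcases List.append_eq_nil_iff.1 h with ⟨h1, h2⟩
      intro x hx
      rcases List.mem_cons.1 hx with rfl | hx
      · intro hc; simp [hc] at h1
      · exact (ih (k+1)).1 h2 x hx
    · intro h
      have hc : ¬ PySem.Chars.isupper c := h c (List.mem_cons_self)
      simp [hc, (ih (k+1)).2 (fun x hx => h x (List.mem_cons_of_mem _ hx))]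

theorem pvCapit_infix_gA (s : List Char) : ∀ prev, (∃ c ∈ s, PySem.Chars.isupper c) →
    "CAPIT".toList <:+: pvGA prev s := by
  induction s with
  | nil => rintro prev ⟨c, hc, -⟩; simp at hc
  | cons c s ih =>
    rintro prev ⟨x, hx, hux⟩
    by_cases hu : PySem.Chars.isupper c
    · have h1 : "CAPIT".toList <:+: pvMark prev := by
        have hB : "CAPIT".toList <:+: pvMarkBind := by decide
        have hC : "CAPIT".toList <:+: pvMarkCap := by decide
        cases prev with
        | none => simpa [pvMark] using hC
        | some p =>
          by_cases hs : PySem.Chars.isspace p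
          · simpa [pvMark, hs] using hC
          · simpa [pvMark, hs] using hB
      simp only [pvGA, hu, if_true]
      rw [List.append_assoc]
      exact List.infix_append_of_infix_left h1
    · have hx' : x ∈ s := by
        rcases List.mem_cons.1 hx with rfl | h
        · exact absurd hux hu
        · exact h
      simp only [pvGA, hu]
      exact List.infix_cons (ih (some c) ⟨x, hx', hux⟩)

theorem pvIsIn_body_iff (l : List Char) :
    PySem.Chars.isIn "CAPIT".toList ((['"'] ++ pvGA none l) ++ ['"']) = true ↔
    pvUps l 0 ≠ [] := by
  constructor
  · intro h hnil
    have hall := (pvUps_eq_nil_iff l 0).1 hnil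
    rw [pvGA_no_upper l none hall] at h
    have hinf := (PySem.Chars.isIn_iff_infix _ _).1 h
    have hC : 'C' ∈ (['"'] ++ l) ++ ['"'] := hinf.mem (by decide)
    rcases List.mem_append.1 hC with h1 | h1
    · rcases List.mem_append.1 h1 with h2 | h2
      · exact absurd h2 (by decide)
      · exact hall 'C' h2 (by decide)
    · exact absurd h1 (by decide)
  · intro hne
    have hex : ∃ c ∈ l, PySem.Chars.isupper c := by
      by_contra hall
      exact hne ((pvUps_eq_nil_iff l 0).2 (fun c hc hu => hall ⟨c, hc, hu⟩))
    have hinf := pvCapit_infix_gA l none hex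
    exact (PySem.Chars.isIn_iff_infix _ _).2
      (List.infix_append_of_infix_left (List.infix_append_of_infix_right hinf))

-- ===== VERDICT (by name: the statement is the Claim_ definition above) =====
theorem lower_gf_string_but_insert_capit_and_bind_spec : Claim_equal_lower_gf_string_but_insert_capit_and_bind := by
  intro string _
  unfold Spec_lower_gf_string_but_insert_capit_and_bind
  show lower_gf_string_but_insert_capit_and_bind string = lower_gf_string_but_insert_capit_and_bind_alt string
  have hbody : pvGB string.toList (['"'], (0:Int)) (pvUps string.toList 0) =
      ['"'] ++ pvGA none string.toList := by
    have h := pvMain string.toList string.toList 0 ['"'] (by simp)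
    simpa [pvPrevO] using h
  have hA := pvGA_foldA string.toList ['"'] none
  have hiff := pvIsIn_body_iff string.toList
  simp only [lower_gf_string_but_insert_capit_and_bind, lower_gf_string_but_insert_capit_and_bind_alt]
  rw [show (PySem.List.enumerate string.toList).filterMap
      (fun p => if PySem.Chars.isupper p.2 then some p.1 else none) = pvUps string.toList 0 from rfl]
  rw [show ((pvUps string.toList 0).foldl (pvStepB string.toList) (['"'], 0)).1 ++
      PySem.List.slice string.toList
        (some ((pvUps string.toList 0).foldl (pvStepB string.toList) (['"'], 0)).2) none =
      pvGB string.toList (['"'], 0) (pvUps string.toList 0) from rfl]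
  rw [hA, hbody]
  simp only [hiff]
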